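-- pv_equiv track=rewrite | github.com/swanhong/matrix-fhe-lattigo | references/integer.py | _find_next_valid_size
-- ===== SOURCE A (Python) =====
-- def _find_next_valid_size(min_size: int) -> int:
--     """Find the smallest size >= min_size that is of form 2^a * 3^b."""
--     if min_size <= 1:
--         return 1
--
--     # Generate candidates of form 2^a * 3^b up to a reasonable limit
--     candidates = []
--     max_power = 20  # Reasonable limit to avoid infinite search
--
--     for a in range(max_power):
--         for b in range(max_power):
--             candidate = (2**a) * (3**b)
--             if candidate >= min_size and candidate <= 2**max_power:
--                 candidates.append(candidate)
--
--     if not candidates: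
--         # Fallback to next power of 2 if no suitable 2^a * 3^b found
--         N = 1
--         while N < min_size:
--             N *= 2
--         return N
--
--     return min(candidates)
-- ===== SOURCE B (Python) =====
-- def _find_next_valid_size(min_size: int) -> int:
--     """Find the smallest size >= min_size that is of form 2^a * 3^b."""
--     if min_size <= 1:
--         return 1
--     LIMIT = 1 << 20
--     best = None
--     p3 = 1
--     while p3 <= LIMIT:
--         if min_size <= p3:
--             c = p3
--         else:
--             q = -(-min_size // p3)          # ceil(min_size / p3)
--             c = p3 << (q - 1).bit_length()  # smallest p3 * 2^a >= min_size
--         if c <= LIMIT and (best is None or c < best):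
--             best = c
--         p3 *= 3
--     if best is None:
--         return 1 << (min_size - 1).bit_length()
--     return best
-- ===== Notes on version B (the rewrite author's own statement) =====
-- stated objective: alternative
-- what changed: B loops only over the powers of three up to the cap and, for each, computes the minimal matching power of two in closed form via ceil-division and bit_length, replacing A's full enumeration of all exponent pairs plus min(); A's doubling-loop fallback becomes the bit_length closed form.
import Mathlib
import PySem

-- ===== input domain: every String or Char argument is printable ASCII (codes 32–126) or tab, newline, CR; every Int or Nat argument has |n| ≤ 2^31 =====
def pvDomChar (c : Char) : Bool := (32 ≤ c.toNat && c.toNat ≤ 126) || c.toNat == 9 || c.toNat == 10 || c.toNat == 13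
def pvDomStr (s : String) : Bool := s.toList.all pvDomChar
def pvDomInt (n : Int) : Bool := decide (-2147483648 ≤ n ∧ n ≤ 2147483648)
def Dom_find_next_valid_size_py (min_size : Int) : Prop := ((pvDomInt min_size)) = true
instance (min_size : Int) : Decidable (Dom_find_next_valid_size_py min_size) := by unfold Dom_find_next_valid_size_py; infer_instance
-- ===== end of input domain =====

-- B replaces A's full enumeration of exponent pairs by a single loop over the powers of three up to
-- the cap, computing each row's minimal matching power of two in closed form via ceil-division and
-- bit_length (objective: alternative — a different algorithm, closed form instead of the inner scan).

-- ===== PORT A =====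
-- while N < min_size: N *= 2   (N starts at 1, so 1 ≤ N is an invariant; termination on min_size - N)
def fallbackA (min_size : Int) (N : Int) (h : 1 ≤ N) : Int :=
  if hN : N < min_size then fallbackA min_size (N * 2) (by omega) else N
termination_by (min_size - N).toNat
decreasing_by omega

-- 2**a with a drawn from range(20) (so 0 ≤ a): ported exactly as 2 ^ a.toNat
def find_next_valid_size_py (min_size : Int) : Int :=
  if min_size ≤ 1 then 1
  else
    let candidates : List Int :=
      (PySem.List.pyRange 0 20 1).foldl
        (fun cs a =>
          (PySem.List.pyRange 0 20 1).foldl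
            (fun cs b =>
              let candidate := (2 : Int) ^ a.toNat * (3 : Int) ^ b.toNat
              if candidate ≥ min_size ∧ candidate ≤ 2 ^ 20 then cs ++ [candidate] else cs)
            cs)
        []
    if candidates = [] then fallbackA min_size 1 (le_refl 1)
    else (PySem.List.min? candidates (fun x => x)).getD 0

-- ===== PORT B =====
-- Source B's loop body: the smallest p3 * 2^a >= min_size, by ceil-division and bit_length
def pvMinimalC (min_size p3 : Int) : Int :=
  if min_size ≤ p3 then p3
  else
    let q := -(PySem.Int.floordiv (-min_size) p3)   -- ceil(min_size / p3)
    p3 <<< PySem.Int.bitLength (q - 1)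

-- Source B's 'if c <= LIMIT and (best is None or c < best): best = c'
def pvUpdate (best : Option Int) (c : Int) : Option Int :=
  if c ≤ 1048576 then
    match best with
    | none => some c
    | some b => if c < b then some c else some b
  else best

-- while p3 <= LIMIT: fold the row's candidate into the running minimum, p3 *= 3
def pvLoopB (min_size : Int) (p3 : Int) (best : Option Int) (h : 1 ≤ p3) : Option Int :=
  if hp : p3 ≤ 1048576 then
    pvLoopB min_size (p3 * 3) (pvUpdate best (pvMinimalC min_size p3)) (by omega)
  else best
termination_by (1048577 - p3).toNat
decreasing_by omega

def find_next_valid_size_py_alt (min_size : Int) : Int :=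
  if min_size ≤ 1 then 1
  else
    match pvLoopB min_size 1 none (le_refl 1) with
    | some v => v
    | none => (1 : Int) <<< PySem.Int.bitLength (min_size - 1)

-- ===== PRECONDITION & SPEC =====
def Spec_find_next_valid_size_py (min_size : Int) (out : Int) : Prop := out = find_next_valid_size_py_alt min_size
instance (min_size : Int) (out : Int) : Decidable (Spec_find_next_valid_size_py min_size out) := by unfold Spec_find_next_valid_size_py; infer_instance

-- ===== CLAIM (what is proved, stated in full; the proofs are below) =====
def Claim_equal_find_next_valid_size_py : Prop := ∀ (min_size : Int), Dom_find_next_valid_size_py min_size → Spec_find_next_valid_size_py min_size (find_next_valid_size_py min_size)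

-- ===== LEMMAS AND PROOFS =====

-- generic membership through a foldl that only ever appends
theorem pv_mem_foldl_iff {α β : Type} (g : List β → α → List β) (Q : α → β → Prop)
    (hg : ∀ cs a x, x ∈ g cs a ↔ x ∈ cs ∨ Q a x) (l : List α) (acc : List β) (x : β) :
    x ∈ List.foldl g acc l ↔ x ∈ acc ∨ ∃ a ∈ l, Q a x := by
  induction l generalizing acc with
  | nil => simp
  | cons a t ih => rw [List.foldl_cons, ih]; simp [hg]; tauto

-- A's candidate list (the let-bound value in find_next_valid_size_py), for proof purposes
def candsA (m : Int) : List Int :=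
  (PySem.List.pyRange 0 20 1).foldl
    (fun cs a =>
      (PySem.List.pyRange 0 20 1).foldl
        (fun cs b =>
          let candidate := (2 : Int) ^ a.toNat * (3 : Int) ^ b.toNat
          if candidate ≥ m ∧ candidate ≤ 2 ^ 20 then cs ++ [candidate] else cs)
        cs)
    []

theorem A_eq (m : Int) :
    find_next_valid_size_py m =
      if m ≤ 1 then 1
      else if candsA m = [] then fallbackA m 1 (le_refl 1)
      else (PySem.List.min? (candsA m) (fun x => x)).getD 0 := rfl

theorem mem_candsA (m x : Int) :
    x ∈ candsA m ↔
      ∃ a : Int, (0 ≤ a ∧ a < 20) ∧ ∃ b : Int, (0 ≤ b ∧ b < 20) ∧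
        ((2 : Int) ^ a.toNat * 3 ^ b.toNat ≥ m ∧ (2 : Int) ^ a.toNat * 3 ^ b.toNat ≤ 2 ^ 20) ∧
        x = (2 : Int) ^ a.toNat * 3 ^ b.toNat := by
  unfold candsA
  rw [pv_mem_foldl_iff _
      (fun (a : Int) (x : Int) => ∃ b ∈ PySem.List.pyRange 0 20 1,
        ((2 : Int) ^ a.toNat * 3 ^ b.toNat ≥ m ∧ (2 : Int) ^ a.toNat * 3 ^ b.toNat ≤ 2 ^ 20) ∧
        x = (2 : Int) ^ a.toNat * 3 ^ b.toNat)]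
  · simp [PySem.List.mem_pyRange_one]
  · intro cs a x
    rw [pv_mem_foldl_iff _
        (fun (b : Int) (x : Int) => ((2 : Int) ^ a.toNat * 3 ^ b.toNat ≥ m ∧ (2 : Int) ^ a.toNat * 3 ^ b.toNat ≤ 2 ^ 20) ∧
          x = (2 : Int) ^ a.toNat * 3 ^ b.toNat)]
    intro cs b x
    dsimp only
    split_ifs with hc
    · simp; tauto
    · simp; tauto

-- the doubling loop from 2^j reaches exactly 2^k when 2^(k-1) < m ≤ 2^k
theorem fallbackA_pow (d : Nat) : ∀ (m : Int) (k j : Nat) (h : 1 ≤ (2 : Int) ^ j),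
    j + d = k → m ≤ 2 ^ k → (∀ i : Nat, i < k → (2 : Int) ^ i < m) →
    fallbackA m ((2 : Int) ^ j) h = 2 ^ k := by
  induction d with
  | zero =>
    intro m k j h hjk hub _
    subst hjk
    have hub' : m ≤ 2 ^ j := by simpa using hub
    rw [fallbackA, dif_neg (not_lt.2 hub')]
    simp
  | succ n ih =>
    intro m k j h hjk hub hlb
    have hjlt : j < k := by omega
    have h2j : (2 : Int) ^ j < m := hlb j hjlt
    rw [fallbackA]
    rw [dif_pos h2j]
    have hpow : (2 : Int) ^ j * 2 = (2 : Int) ^ (j + 1) := by ring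
    have h1 : (1 : Int) ≤ (2 : Int) ^ (j + 1) := one_le_pow₀ (by norm_num)
    calc fallbackA m ((2 : Int) ^ j * 2) (by omega)
        = fallbackA m ((2 : Int) ^ (j + 1)) h1 := by congr 1
      _ = 2 ^ k := ih m k (j + 1) h1 (by omega) hub hlb

theorem fallback_closed_form (m : Int) (h2 : 2 ≤ m) (h : (1 : Int) ≤ 1) :
    fallbackA m 1 h = (1 : Int) <<< PySem.Int.bitLength (m - 1) := by
  set k := PySem.Int.bitLength (m - 1) with hk
  have hne : m - 1 ≠ 0 := by omega
  have habs : ((m - 1).natAbs : Int) = m - 1 := Int.natAbs_of_nonneg (by omega)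
  have hub' : (m - 1).natAbs < 2 ^ k := PySem.Int.lt_two_pow_bitLength (m - 1)
  have hub : m ≤ 2 ^ k := by
    have : ((m - 1).natAbs : Int) < ((2 ^ k : Nat) : Int) := by exact_mod_cast hub'
    rw [habs] at this
    push_cast at this
    omega
  have hlb' : 2 ^ (k - 1) ≤ (m - 1).natAbs := PySem.Int.two_pow_bitLength_le (m - 1) hne
  have hlb : ∀ i : Nat, i < k → (2 : Int) ^ i < m := by
    intro i hi
    have h1 : (2 : Nat) ^ i ≤ 2 ^ (k - 1) := Nat.pow_le_pow_right (by omega) (by omega)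
    have h2' : ((2 ^ i : Nat) : Int) ≤ ((m - 1).natAbs : Int) := by exact_mod_cast le_trans h1 hlb'
    rw [habs] at h2'
    push_cast at h2'
    omega
  have h0 : fallbackA m ((2 : Int) ^ 0) (by norm_num) = 2 ^ k :=
    fallbackA_pow k m k 0 (by norm_num) (by omega) hub hlb
  have : fallbackA m 1 h = fallbackA m ((2 : Int) ^ 0) (by norm_num) := by congr 1
  rw [this, h0, Int.shiftLeft_eq, one_mul]

-- ----- properties of pvMinimalC -----

theorem pvMinimalC_pow (m p3 : Int) (hp : 1 ≤ p3) :
    ∃ a : Nat, pvMinimalC m p3 = p3 * 2 ^ a := by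
  unfold pvMinimalC
  split_ifs with h
  · exact ⟨0, by ring⟩
  · exact ⟨_, by rw [Int.shiftLeft_eq]⟩

theorem pvMinimalC_ceil (m p3 : Int) (hp : 1 ≤ p3) (hm : ¬ m ≤ p3) :
    (p3 * (-(PySem.Int.floordiv (-m) p3) - 1) < m ∧ m ≤ p3 * -(PySem.Int.floordiv (-m) p3)) := by
  have := (PySem.Int.neg_floordiv_neg_eq_iff_of_pos (a := m) (b := p3)
    (q := -(PySem.Int.floordiv (-m) p3)) (by omega)).1 rfl
  constructor
  · nlinarith [this.1]
  · nlinarith [this.2]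

theorem pvMinimalC_ge (m p3 : Int) (hp : 1 ≤ p3) (hm : 2 ≤ m) :
    m ≤ pvMinimalC m p3 := by
  unfold pvMinimalC
  split_ifs with h
  · omega
  · set q := -(PySem.Int.floordiv (-m) p3) with hq
    obtain ⟨hlo, hhi⟩ := pvMinimalC_ceil m p3 hp h
    have hq2 : 2 ≤ q := by nlinarith
    set k := PySem.Int.bitLength (q - 1) with hk
    have hne : q - 1 ≠ 0 := by omega
    have habs : ((q - 1).natAbs : Int) = q - 1 := Int.natAbs_of_nonneg (by omega)
    have hub' : (q - 1).natAbs < 2 ^ k := PySem.Int.lt_two_pow_bitLength (q - 1)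
    have hqk : q ≤ 2 ^ k := by
      have : ((q - 1).natAbs : Int) < ((2 ^ k : Nat) : Int) := by exact_mod_cast hub'
      rw [habs] at this; push_cast at this; omega
    rw [Int.shiftLeft_eq]
    calc m ≤ p3 * q := hhi
      _ ≤ p3 * 2 ^ k := by
          apply mul_le_mul_of_nonneg_left hqk (by omega)

theorem pvMinimalC_min (m p3 : Int) (hp : 1 ≤ p3) (a : Nat) (ha : m ≤ p3 * 2 ^ a) :
    pvMinimalC m p3 ≤ p3 * 2 ^ a := by
  unfold pvMinimalC
  split_ifs with h
  · have : (1 : Int) ≤ 2 ^ a := one_le_pow₀ (by norm_num)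
    nlinarith
  · set q := -(PySem.Int.floordiv (-m) p3) with hq
    obtain ⟨hlo, hhi⟩ := pvMinimalC_ceil m p3 hp h
    set k := PySem.Int.bitLength (q - 1) with hk
    have hq2 : 2 ≤ q := by nlinarith
    have hne : q - 1 ≠ 0 := by omega
    have habs : ((q - 1).natAbs : Int) = q - 1 := Int.natAbs_of_nonneg (by omega)
    have hlb' : 2 ^ (k - 1) ≤ (q - 1).natAbs := PySem.Int.two_pow_bitLength_le (q - 1) hne
    have hlbi : ((2 : Int)) ^ (k - 1) ≤ q - 1 := by
      have : ((2 ^ (k - 1) : Nat) : Int) ≤ ((q - 1).natAbs : Int) := by exact_mod_cast hlb'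
      rw [habs] at this; push_cast at this; omega
    -- q - 1 < 2^a, so 2^(k-1) < 2^a, so k ≤ a
    have hqa : q - 1 < 2 ^ a := by
      have : p3 * (q - 1) < p3 * 2 ^ a := by nlinarith
      exact lt_of_mul_lt_mul_left this (by omega)
    have hka : k ≤ a := by
      have hub' : (q - 1).natAbs < 2 ^ k := PySem.Int.lt_two_pow_bitLength (q - 1)
      have hcast : ((2 ^ a : Nat) : Int) = 2 ^ a := by push_cast; ring
      have ht : (q - 1).natAbs < 2 ^ a := by omega
      have h2 : k - 1 < a := by
        have hlt : (2 : Nat) ^ (k - 1) < 2 ^ a := lt_of_le_of_lt hlb' ht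
        exact (Nat.pow_lt_pow_iff_right (by norm_num)).1 hlt
      have hk1 : 1 ≤ k := by
        by_contra hcon
        have hk0 : k = 0 := by omega
        rw [hk0] at hub'
        simp at hub'
        omega
      omega
    rw [Int.shiftLeft_eq]
    exact mul_le_mul_of_nonneg_left (pow_le_pow_right₀ (by norm_num) hka) (by omega)

-- ----- the B loop computes the minimum of the row candidates -----

def pvIsMinOpt (P : Int → Prop) : Option Int → Prop
  | none => ∀ c, ¬ P c
  | some v => P v ∧ ∀ c, P c → v ≤ c

-- candidates contributed by rows p3 * 3^k (k ≥ 0) that fit under the cap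
def pvRest (m p3 c : Int) : Prop :=
  ∃ k : Nat, p3 * 3 ^ k ≤ 1048576 ∧ c = pvMinimalC m (p3 * 3 ^ k) ∧ c ≤ 1048576

theorem pvIsMinOpt_congr {P Q : Int → Prop} (h : ∀ c, P c ↔ Q c) {o : Option Int}
    (ho : pvIsMinOpt P o) : pvIsMinOpt Q o := by
  cases o with
  | none => intro c hc; exact ho c ((h c).2 hc)
  | some v => exact ⟨(h v).1 ho.1, fun c hc => ho.2 c ((h c).2 hc)⟩

theorem pvRest_step (m p3 c : Int) (hp : 1 ≤ p3) (hcap : p3 ≤ 1048576) :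
    pvRest m p3 c ↔ ((c = pvMinimalC m p3 ∧ c ≤ 1048576) ∨ pvRest m (p3 * 3) c) := by
  constructor
  · rintro ⟨k, hk, rfl, hc⟩
    cases k with
    | zero =>
      left
      refine ⟨by norm_num, by simpa using hc⟩
    | succ n =>
      right
      refine ⟨n, ?_, ?_, hc⟩
      · calc p3 * 3 * 3 ^ n = p3 * 3 ^ (n + 1) := by ring
          _ ≤ 1048576 := hk
      · congr 1; ring
  · rintro (⟨rfl, hc⟩ | ⟨k, hk, rfl, hc⟩)
    · refine ⟨0, ?_, ?_, hc⟩
      · simpa using hcap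
      · simp
    · refine ⟨k + 1, ?_, ?_, hc⟩
      · calc p3 * 3 ^ (k + 1) = p3 * 3 * 3 ^ k := by ring
          _ ≤ 1048576 := hk
      · congr 1; ring

theorem pvRest_empty (m p3 c : Int) (hp : ¬ p3 ≤ 1048576) : ¬ pvRest m p3 c := by
  rintro ⟨k, hk, _, _⟩
  have : (1 : Int) ≤ 3 ^ k := one_le_pow₀ (by norm_num)
  nlinarith

theorem pvUpdate_spec (P : Int → Prop) (best : Option Int) (c : Int)
    (hbest : pvIsMinOpt P best) :
    pvIsMinOpt (fun x => P x ∨ (x = c ∧ x ≤ 1048576)) (pvUpdate best c) := by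
  cases best with
  | none =>
    simp only [pvUpdate]
    split_ifs with hcle
    · refine ⟨Or.inr ⟨rfl, hcle⟩, ?_⟩
      rintro x (hx | ⟨rfl, _⟩)
      · exact absurd hx (hbest x)
      · exact le_refl _
    · rintro x (hx | ⟨rfl, hx⟩)
      · exact hbest x hx
      · exact hcle hx
  | some b =>
    obtain ⟨hbP, hbmin⟩ := hbest
    simp only [pvUpdate]
    split_ifs with hcle hcb
    · refine ⟨Or.inr ⟨rfl, hcle⟩, ?_⟩
      rintro x (hx | ⟨rfl, _⟩)
      · exact le_of_lt (lt_of_lt_of_le hcb (hbmin x hx))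
      · exact le_refl _
    · refine ⟨Or.inl hbP, ?_⟩
      rintro x (hx | ⟨rfl, hx⟩)
      · exact hbmin x hx
      · omega
    · refine ⟨Or.inl hbP, ?_⟩
      rintro x (hx | ⟨rfl, hx⟩)
      · exact hbmin x hx
      · exact absurd hx hcle

theorem pvLoopB_spec (m : Int) : ∀ (n : Nat) (p3 : Int) (h : 1 ≤ p3), (1048577 - p3).toNat = n →
    ∀ (best : Option Int) (P : Int → Prop), pvIsMinOpt P best →
    pvIsMinOpt (fun c => P c ∨ pvRest m p3 c) (pvLoopB m p3 best h) := by
  intro n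
  induction n using Nat.strong_induction_on with
  | _ n ih =>
    intro p3 h hn best P hbest
    rw [pvLoopB]
    split_ifs with hp
    · have hrec := ih ((1048577 - p3 * 3).toNat) (by omega) (p3 * 3) (by omega) rfl
      have hres := hrec _ _ (pvUpdate_spec P best (pvMinimalC m p3) hbest)
      refine pvIsMinOpt_congr ?_ hres
      intro x
      rw [pvRest_step m p3 x h hp]
      tauto
    · refine pvIsMinOpt_congr ?_ hbest
      intro x
      have := pvRest_empty m p3 x hp
      tauto

-- ----- relating the two candidate sets -----

-- 2^a * 3^b = 2^20 forces a = 20, b = 0 (so no A-candidate equals 2^20)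
theorem pv_eq_two_pow_20 (a b : Nat) (h : (2 : Int) ^ a * 3 ^ b = 2 ^ 20) : a = 20 ∧ b = 0 := by
  have hnat : (2 : Nat) ^ a * 3 ^ b = 2 ^ 20 := by exact_mod_cast h
  have hb : b = 0 := by
    by_contra hb0
    have h3 : (3 : Nat) ∣ 3 ^ b := dvd_pow_self 3 hb0
    have : (3 : Nat) ∣ 2 ^ 20 := Dvd.dvd.trans h3 ⟨2 ^ a, by linarith [hnat]⟩
    have hco : Nat.Coprime 3 (2 ^ 20) := by decide
    omega
  subst hb
  simp at hnat
  constructor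
  · exact Nat.pow_right_injective (by norm_num) hnat
  · rfl

-- every B candidate other than 2^20 is one of A's candidates
theorem pvRest_sub_candsA (m c : Int) (hm : 2 ≤ m) (hc : pvRest m 1 c) (hne : c ≠ 2 ^ 20) :
    c ∈ candsA m := by
  obtain ⟨k, hk, hceq, hcle⟩ := hc
  rw [one_mul] at hk hceq
  have hp3 : (1 : Int) ≤ 3 ^ k := one_le_pow₀ (by norm_num)
  obtain ⟨a, ha⟩ := pvMinimalC_pow m (3 ^ k) hp3
  have hge : m ≤ c := hceq ▸ pvMinimalC_ge m (3 ^ k) hp3 hm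
  rw [ha] at hceq
  -- k ≤ 12 since 3^13 > 2^20
  have hk12 : k ≤ 12 := by
    by_contra hcon
    push_neg at hcon
    have : (3 : Int) ^ 13 ≤ 3 ^ k := pow_le_pow_right₀ (by norm_num) (by omega)
    have h13 : (1594323 : Int) ≤ 3 ^ k := by norm_num at this; exact this
    omega
  -- a ≤ 20, and a = 20 forces c = 2^20
  have h2a : (2 : Int) ^ a ≤ 2 ^ 20 := by
    have : (2 : Int) ^ a ≤ 3 ^ k * 2 ^ a := by nlinarith [pow_pos (by norm_num : (0:Int) < 2) a]
    calc (2 : Int) ^ a ≤ 3 ^ k * 2 ^ a := this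
      _ = c := hceq.symm
      _ ≤ 2 ^ 20 := by exact_mod_cast hcle
  have ha20 : a ≤ 20 := by
    by_contra hcon
    push_neg at hcon
    have : (2 : Int) ^ 21 ≤ 2 ^ a := pow_le_pow_right₀ (by norm_num) (by omega)
    norm_num at this h2a
    omega
  have ha19 : a < 20 := by
    rcases Nat.lt_or_ge a 20 with h | h
    · exact h
    · exfalso
      have ha' : a = 20 := by omega
      subst ha'
      -- c = 3^k * 2^20 ≤ 2^20 forces 3^k = 1, c = 2^20
      have h3k : (3 : Int) ^ k = 1 := by
        by_contra hk1
        have : (3 : Int) ^ 1 ≤ 3 ^ k := by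
          apply pow_le_pow_right₀ (by norm_num)
          rcases Nat.eq_zero_or_pos k with h0 | h0
          · subst h0; simp at hk1
          · omega
        have hpos : (0:Int) < 2 ^ 20 := by positivity
        have h220 : (3:Int) * 2 ^ 20 ≤ c := by rw [hceq]; nlinarith
        have e20 : (3:Int) * 2 ^ 20 = 3145728 := by norm_num
        omega
      apply hne
      rw [hceq, h3k, one_mul]
  refine (mem_candsA m c).2 ⟨(a : Int), ⟨by positivity, by exact_mod_cast ha19⟩,
    (k : Int), ⟨by positivity, by exact_mod_cast (by omega : k < 20)⟩, ⟨?_, ?_⟩, ?_⟩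
  · simp only [Int.toNat_natCast]
    have hge2 : m ≤ 3 ^ k * 2 ^ a := by rw [← ha]; exact pvMinimalC_ge m (3 ^ k) hp3 hm
    calc m ≤ 3 ^ k * 2 ^ a := hge2
      _ = 2 ^ a * 3 ^ k := by ring
  · simp only [Int.toNat_natCast]
    have h' : (2:Int) ^ a * 3 ^ k = c := by rw [hceq]; ring
    have e20 : (2:Int) ^ 20 = 1048576 := by norm_num
    omega
  · simp only [Int.toNat_natCast]
    rw [hceq]; ring

-- every A candidate is dominated by some B candidate
theorem candsA_dominated (m x : Int) (hm : 2 ≤ m) (hx : x ∈ candsA m) :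
    ∃ c, pvRest m 1 c ∧ c ≤ x := by
  obtain ⟨a, ⟨ha0, ha20⟩, b, ⟨hb0, hb20⟩, ⟨hge, hle⟩, hxeq⟩ := (mem_candsA m x).1 hx
  have hp3 : (1 : Int) ≤ 3 ^ b.toNat := one_le_pow₀ (by norm_num)
  have hxform : x = 3 ^ b.toNat * 2 ^ a.toNat := by rw [hxeq]; ring
  have hxle : x ≤ 2 ^ 20 := by rw [hxeq]; exact hle
  have hxge : m ≤ x := by rw [hxeq]; exact hge
  have hmin_le : pvMinimalC m (3 ^ b.toNat) ≤ x := by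
    rw [hxform]
    exact pvMinimalC_min m (3 ^ b.toNat) hp3 a.toNat (by rw [← hxform]; exact hxge)
  refine ⟨pvMinimalC m (3 ^ b.toNat), ⟨b.toNat, ?_, by rw [one_mul], ?_⟩, hmin_le⟩
  · rw [one_mul]
    have h2pos : (0:Int) < 2 ^ a.toNat := by positivity
    have e20 : (2:Int) ^ 20 = 1048576 := by norm_num
    nlinarith
  · have e20 : (2:Int) ^ 20 = 1048576 := by norm_num
    omega

-- ===== VERDICT (by name: the statement is the Claim_ definition above) =====
theorem find_next_valid_size_py_spec : Claim_equal_find_next_valid_size_py := by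
  intro m _
  unfold Spec_find_next_valid_size_py find_next_valid_size_py_alt
  rw [A_eq]
  by_cases hm : m ≤ 1
  · simp [hm]
  · rw [if_neg hm, if_neg hm]
    have h2 : 2 ≤ m := by omega
    have hloop := pvLoopB_spec m 1048576 1 (le_refl 1) (by omega) none (fun _ => False)
      (by intro c hc; exact hc)
    cases hB : pvLoopB m 1 none (le_refl 1) with
    | none =>
      rw [hB] at hloop
      -- no B candidate, hence no A candidate
      have hempty : candsA m = [] := by
        rw [List.eq_nil_iff_forall_not_mem]
        intro x hx
        obtain ⟨c, hc, _⟩ := candsA_dominated m x h2 hx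
        exact hloop c (Or.inr hc)
      rw [if_pos hempty]
      exact fallback_closed_form m h2 (le_refl 1)
    | some v =>
      rw [hB] at hloop
      obtain ⟨hvP, hvmin⟩ := hloop
      have hvRest : pvRest m 1 v := by tauto
      obtain ⟨kv, hkv, hveq, hvle⟩ := hvRest
      have hvge : m ≤ v := by
        rw [one_mul] at hveq
        exact hveq ▸ pvMinimalC_ge m (3 ^ kv) (one_le_pow₀ (by norm_num)) h2
      by_cases hA : candsA m = []
      · -- A falls back; B's only possible candidate is 2^20
        rw [if_pos hA]
        have hv20 : v = 2 ^ 20 := by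
          by_contra hne
          have := pvRest_sub_candsA m v h2 ⟨kv, hkv, hveq, hvle⟩ hne
          rw [hA] at this
          simp at this
        -- m > 2^19, else 2^19 would be an A candidate
        have hm19 : (2:Int) ^ 19 < m := by
          by_contra hcon
          push_neg at hcon
          have hmem : (2:Int) ^ 19 ∈ candsA m := by
            refine (mem_candsA m _).2 ⟨19, by norm_num, 0, by norm_num, ⟨?_, ?_⟩, ?_⟩
            · norm_num at hcon ⊢
              exact hcon
            · decide
            · decide
          rw [hA] at hmem
          simp at hmem
        have hfb : fallbackA m 1 (le_refl 1) = 2 ^ 20 := by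
          have h020 : fallbackA m ((2:Int) ^ 0) (by norm_num) = 2 ^ 20 := by
            apply fallbackA_pow 20 m 20 0 (by norm_num) (by omega)
            · rw [hv20] at hvge; exact hvge
            · intro i hi
              have : (2:Int) ^ i ≤ 2 ^ 19 := pow_le_pow_right₀ (by norm_num) (by omega)
              omega
          calc fallbackA m 1 (le_refl 1) = fallbackA m ((2:Int) ^ 0) (by norm_num) := by congr 1
            _ = 2 ^ 20 := h020
        rw [hfb, hv20]
      · rw [if_neg hA]
        cases hmin : PySem.List.min? (candsA m) (fun x => x) with
        | none => exact absurd ((PySem.List.min?_eq_none_iff _ _).1 hmin) hA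
        | some w =>
          have hwmem : w ∈ candsA m := PySem.List.min?_mem hmin
          have hwmin : ∀ y ∈ candsA m, w ≤ y := fun y hy => PySem.List.min?_isMin hmin y hy
          -- some B candidate c ≤ w, so v ≤ w
          obtain ⟨c, hcRest, hcw⟩ := candsA_dominated m w h2 hwmem
          have hvw : v ≤ w := le_trans (hvmin c (Or.inr hcRest)) hcw
          -- v ≠ 2^20: otherwise w = 2^20 would be an A candidate, impossible
          have hv20 : v ≠ 2 ^ 20 := by
            intro hveq20
            obtain ⟨aw, ⟨haw0, haw20⟩, bw, ⟨hbw0, hbw20⟩, ⟨_, hwle⟩, hweq⟩ := (mem_candsA m w).1 hwmem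
            have hw20 : w = 2 ^ 20 := by omega
            have := pv_eq_two_pow_20 aw.toNat bw.toNat (by rw [← hweq, hw20])
            omega
          have hvA : v ∈ candsA m := pvRest_sub_candsA m v h2 ⟨kv, hkv, hveq, hvle⟩ hv20
          have hwv : w ≤ v := hwmin v hvA
          simp [le_antisymm hvw hwv]
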